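-- pv_equiv track=rewrite | github.com/MinKyeom/KMK-DREAM | Programmers/lv3/아방가르드 타일링.py | solution
-- ===== SOURCE A (Python) =====
-- def solution(n):
--     # n:n가로 길이
--     dp = [0, 1, 3, 10]
--     check = [2, 2, 4]
--     if n > 6:
--         dp += [0] * (n - 3)
--         dp[4] = dp[3] + dp[2] * 2 + dp[1] * 5 + 2
--         dp[5] = dp[4] + dp[3] * 2 + dp[2] * 5 + dp[1] * 2 + 2
--         dp[6] = dp[5] + dp[4] * 2 + dp[3] * 5 + dp[2] * 2 + dp[1] * 2 + 4
--
--     else: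
--         dp += [0] * 3
--         dp[4] = dp[3] + dp[2] * 2 + dp[1] * 5 + 2
--         dp[5] = dp[4] + dp[3] * 2 + dp[2] * 5 + dp[1] * 2 + 2
--         dp[6] = dp[5] + dp[4] * 2 + dp[3] * 5 + dp[2] * 2 + dp[1] * 2 + 4
--         return dp[n] % 1000000007
--
--     for i in range(7, n + 1):
--         result = 0
--         k = i - 1
--         count = 0
--         while k >= 0:
--             if k == i - 1:
--                 result += dp[k]
--             elif k == i - 2:
--                 result += 2 * dp[k]
--             elif k == i - 3:
--                 result += 5 * dp[k]
--             elif k == 0: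
--                 num = count % 3
--                 result += check[num]
--             else:
--                 num = count % 3
--                 result += (check[num] * dp[k])
--                 count += 1
--             k -= 1
--
--         dp[i] = result % 1000000007
--
--     return dp[n]  # %1000000007
-- ===== SOURCE B (Python) =====
-- def solution(n):
--     MOD = 1000000007
--     base = [0, 1, 3, 10, 23, 62, 170]
--     if n <= 6:
--         return base[n] % MOD
--     c = (2, 2, 4)
--     # dp[i-1], dp[i-2], dp[i-3] and, for each residue class r = k % 3,
--     # s[r] = (sum of e[k] for k <= i-4 with k % 3 == r) % MOD, where e[0] = 1, e[k] = dp[k]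
--     d1, d2, d3 = 170, 62, 23
--     s = [11, 1, 3]
--     for i in range(7, n + 1):
--         m = (i - 4) % 3
--         cur = (d1 + 2 * d2 + 5 * d3
--                + c[m] * s[0] + c[(m + 2) % 3] * s[1] + c[(m + 1) % 3] * s[2]) % MOD
--         s[(i - 3) % 3] = (s[(i - 3) % 3] + d3) % MOD
--         d1, d2, d3 = cur, d1, d2
--     return d1
-- ===== Notes on version B (the rewrite author's own statement) =====
-- stated objective: faster
-- what changed: Replaces A's O(n^2) inner re-scan of all earlier dp entries (periodic coefficients 2,2,4) with an O(n) loop maintaining three modular running sums of dp grouped by index mod 3 plus the last three dp values.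
import Mathlib
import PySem

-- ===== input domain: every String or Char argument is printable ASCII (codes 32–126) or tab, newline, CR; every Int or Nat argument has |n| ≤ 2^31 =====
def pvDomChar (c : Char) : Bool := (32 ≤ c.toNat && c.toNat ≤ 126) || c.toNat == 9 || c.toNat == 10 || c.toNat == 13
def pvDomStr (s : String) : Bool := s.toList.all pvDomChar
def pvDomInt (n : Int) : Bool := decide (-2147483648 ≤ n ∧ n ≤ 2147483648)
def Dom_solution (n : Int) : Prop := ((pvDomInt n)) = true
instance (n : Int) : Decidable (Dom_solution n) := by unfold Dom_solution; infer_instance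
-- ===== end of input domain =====

-- B replaces A's quadratic inner re-scan of dp (periodic coefficients 2,2,4) by a single
-- pass maintaining three running sums of dp grouped by index mod 3; objective: faster.


-- ===== PORT A =====
-- Python list `check = [2, 2, 4]`
def pvCheck : List Int := [2, 2, 4]

-- the inner `while k >= 0` loop of A; fuel = k + 1 (current k is fuel - 1)
def pvGoA (dp : Array Int) (i : Nat) : Nat → Int → Int → Int
  | 0, _, result => result
  | (k+1), count, result =>
    if k = i - 1 then pvGoA dp i k count (result + dp.getD k 0)
    else if k = i - 2 then pvGoA dp i k count (result + 2 * dp.getD k 0)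
    else if k = i - 3 then pvGoA dp i k count (result + 5 * dp.getD k 0)
    else if k = 0 then
      pvGoA dp i k count (result + (PySem.List.pyGet? pvCheck (PySem.Int.mod count 3)).getD 0)
    else
      pvGoA dp i k (count + 1)
        (result + (PySem.List.pyGet? pvCheck (PySem.Int.mod count 3)).getD 0 * dp.getD k 0)

-- `for i in range(7, n + 1)`; fuel = number of remaining iterations
def pvLoopA : Array Int → Nat → Nat → Array Int
  | dp, _, 0 => dp
  | dp, i, fuel+1 =>
      pvLoopA (dp.setIfInBounds i (PySem.Int.mod (pvGoA dp i i 0 0) 1000000007)) (i+1) fuel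

-- A's Python list `dp` is ported as Array Int; every index access is in range on Pre_.
-- pvDp0/pvDp1/pvDp2/pvInitA are the successive states of dp in A's n > 6 branch:
-- `dp += [0] * (n - 3)` and the three seed assignments dp[4], dp[5], dp[6].
def pvDp0 (n : Int) : Array Int := #[0, 1, 3, 10] ++ Array.replicate (n - 3).toNat 0
def pvDp1 (n : Int) : Array Int :=
  (pvDp0 n).setIfInBounds 4
    ((pvDp0 n).getD 3 0 + (pvDp0 n).getD 2 0 * 2 + (pvDp0 n).getD 1 0 * 5 + 2)
def pvDp2 (n : Int) : Array Int :=
  (pvDp1 n).setIfInBounds 5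
    ((pvDp1 n).getD 4 0 + (pvDp1 n).getD 3 0 * 2 + (pvDp1 n).getD 2 0 * 5
      + (pvDp1 n).getD 1 0 * 2 + 2)
def pvInitA (n : Int) : Array Int :=
  (pvDp2 n).setIfInBounds 6
    ((pvDp2 n).getD 5 0 + (pvDp2 n).getD 4 0 * 2 + (pvDp2 n).getD 3 0 * 5
      + (pvDp2 n).getD 2 0 * 2 + (pvDp2 n).getD 1 0 * 2 + 4)

def solution (n : Int) : Int :=
  if n > 6 then
    (pvLoopA (pvInitA n) 7 (n + 1 - 7).toNat).getD n.toNat 0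
  else
    let dpa : List Int := [0, 1, 3, 10] ++ [0, 0, 0]
    let dpb := dpa.set 4 (dpa.getD 3 0 + dpa.getD 2 0 * 2 + dpa.getD 1 0 * 5 + 2)
    let dpc := dpb.set 5
      (dpb.getD 4 0 + dpb.getD 3 0 * 2 + dpb.getD 2 0 * 5 + dpb.getD 1 0 * 2 + 2)
    let dpd := dpc.set 6
      (dpc.getD 5 0 + dpc.getD 4 0 * 2 + dpc.getD 3 0 * 5 + dpc.getD 2 0 * 2 + dpc.getD 1 0 * 2 + 4)
    PySem.Int.mod ((PySem.List.pyGet? dpd n).getD 0) 1000000007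

-- ===== PORT B =====
-- B's tuple c = (2, 2, 4), indexed by an already-reduced residue
def pvCB (r : Nat) : Int := if r = 0 then 2 else if r = 1 then 2 else 4

-- one iteration of B's `for i in range(7, n + 1)` body on state (d1, d2, d3, s0, s1, s2)
def pvStepB (st : Int × Int × Int × Int × Int × Int) (i : Nat) : Int × Int × Int × Int × Int × Int :=
  let (d1, d2, d3, s0, s1, s2) := st
  let m := (i - 4) % 3
  let cur := PySem.Int.mod
    (d1 + 2 * d2 + 5 * d3 + pvCB m * s0 + pvCB ((m + 2) % 3) * s1 + pvCB ((m + 1) % 3) * s2)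
    1000000007
  let s0' := if (i - 3) % 3 = 0 then PySem.Int.mod (s0 + d3) 1000000007 else s0
  let s1' := if (i - 3) % 3 = 1 then PySem.Int.mod (s1 + d3) 1000000007 else s1
  let s2' := if (i - 3) % 3 = 2 then PySem.Int.mod (s2 + d3) 1000000007 else s2
  (cur, d1, d2, s0', s1', s2')

def pvLoopB : (Int × Int × Int × Int × Int × Int) → Nat → Nat → Int × Int × Int × Int × Int × Int
  | st, _, 0 => st
  | st, i, fuel+1 => pvLoopB (pvStepB st i) (i+1) fuel

def solution_alt (n : Int) : Int :=
  if n ≤ 6 then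
    PySem.Int.mod ((PySem.List.pyGet? [0, 1, 3, 10, 23, 62, 170] n).getD 0) 1000000007
  else
    (pvLoopB (170, 62, 23, 11, 1, 3) 7 (n + 1 - 7).toNat).1

-- ===== PRECONDITION & SPEC =====
-- Pre_ excludes exactly n ≤ -8, on which A raises IndexError (its dp list has 7 elements in
-- the n ≤ 6 branch); B raises IndexError there as well.  A returns on every n ≥ -7.
def Pre_solution (n : Int) : Prop := -7 ≤ n
instance (n : Int) : Decidable (Pre_solution n) := by unfold Pre_solution; infer_instance
def pvWitness_solution : Int := (5)

def Spec_solution (n : Int) (out : Int) : Prop := out = solution_alt n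
instance (n : Int) (out : Int) : Decidable (Spec_solution n out) := by unfold Spec_solution; infer_instance

-- ===== CLAIM (what is proved, stated in full; the proofs are below) =====
def Claim_equal_solution : Prop := ∀ (n : Int), Dom_solution n → Pre_solution n → Spec_solution n (solution n)

-- ===== LEMMAS AND PROOFS =====

-- the coefficient 2,2,4 as a function of the (unreduced) middle-loop counter
def pvCC (cnt : Nat) : Int := pvCB (cnt % 3)

-- the common spec sequence: pvF i = dp[i]; pvMS j cnt = A's middle-loop contribution
mutual
def pvF : Nat → Int
  | 0 => 0 | 1 => 1 | 2 => 3 | 3 => 10 | 4 => 23 | 5 => 62 | 6 => 170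
  | (i+7) =>
      PySem.Int.mod (pvF (i+6) + 2 * pvF (i+5) + 5 * pvF (i+4) + pvMS (i+3) 0) 1000000007
def pvMS : Nat → Nat → Int
  | 0, cnt => pvCC cnt
  | (j+1), cnt => pvCC cnt * pvF (j+1) + pvMS j (cnt+1)
end

-- class sums: pvCS r j = Σ_{t ≤ j, t % 3 = r} e t, with e 0 = 1 and e t = pvF t for t ≥ 1
def pvCS (r : Nat) : Nat → Int
  | 0 => if r = 0 then 1 else 0
  | (j+1) => pvCS r j + (if (j+1) % 3 = r then pvF (j+1) else 0)

theorem pvCC_congr {x y : Nat} (h : x % 3 = y % 3) : pvCC x = pvCC y := by simp [pvCC, h]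

theorem pvCheck_get (cnt : Nat) :
    (PySem.List.pyGet? pvCheck (PySem.Int.mod (cnt : Int) 3)).getD 0 = pvCC cnt := by
  have hm : PySem.Int.mod (cnt : Int) 3 = ((cnt % 3 : Nat) : Int) := by
    exact_mod_cast PySem.Int.mod_natCast cnt 3
  have h3 : cnt % 3 = 0 ∨ cnt % 3 = 1 ∨ cnt % 3 = 2 := by omega
  rw [hm]
  rcases h3 with hc | hc | hc <;> rw [hc] <;> simp [pvCheck, pvCC, pvCB, hc]

-- decomposition of A's middle-loop sum into the three class sums
theorem pvMS_decomp (j cnt : Nat) :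
    pvMS j cnt = pvCC (cnt + j) * pvCS 0 j + pvCC (cnt + j + 2) * pvCS 1 j
      + pvCC (cnt + j + 1) * pvCS 2 j := by
  induction j generalizing cnt with
  | zero => simp [pvMS, pvCS, pvCC]
  | succ j ih =>
    have hms : pvMS (j+1) cnt = pvCC cnt * pvF (j+1) + pvMS j (cnt+1) := by rw [pvMS]
    have h0 : pvCS 0 (j+1) = pvCS 0 j + (if (j+1) % 3 = 0 then pvF (j+1) else 0) := by rw [pvCS]
    have h1 : pvCS 1 (j+1) = pvCS 1 j + (if (j+1) % 3 = 1 then pvF (j+1) else 0) := by rw [pvCS]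
    have h2 : pvCS 2 (j+1) = pvCS 2 j + (if (j+1) % 3 = 2 then pvF (j+1) else 0) := by rw [pvCS]
    rw [hms, ih (cnt+1), h0, h1, h2,
      pvCC_congr (show (cnt+1+j) % 3 = (cnt+(j+1)) % 3 by omega),
      pvCC_congr (show (cnt+1+j+2) % 3 = (cnt+(j+1)+2) % 3 by omega),
      pvCC_congr (show (cnt+1+j+1) % 3 = (cnt+(j+1)+1) % 3 by omega)]
    rcases (show (j+1) % 3 = 0 ∨ (j+1) % 3 = 1 ∨ (j+1) % 3 = 2 by omega) with hc | hc | hc <;>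
      rw [hc] <;> norm_num
    · rw [pvCC_congr (show (cnt+(j+1)) % 3 = cnt % 3 by omega)]; ring
    · rw [pvCC_congr (show (cnt+(j+1)+2) % 3 = cnt % 3 by omega)]; ring
    · rw [pvCC_congr (show (cnt+(j+1)+1) % 3 = cnt % 3 by omega)]; ring

-- A's middle loop (k from j down to 0, all k ≤ i - 4) computes pvMS
theorem pvGoA_mid (dp : Array Int) (i : Nat)
    (hdp : ∀ t, t < i → dp.getD t 0 = pvF t) :
    ∀ j (cnt : Nat) (result : Int), j + 4 ≤ i →
      pvGoA dp i (j+1) (cnt : Int) result = result + pvMS j cnt := by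
  intro j
  induction j with
  | zero =>
    intro cnt result hj
    rw [show pvGoA dp i 1 (cnt : Int) result
        = result + (PySem.List.pyGet? pvCheck (PySem.Int.mod (cnt : Int) 3)).getD 0 from by
      rw [pvGoA]
      rw [if_neg (by omega), if_neg (by omega), if_neg (by omega), if_pos rfl]
      rw [pvGoA]]
    rw [pvCheck_get, pvMS]
  | succ j ih =>
    intro cnt result hj
    have h1 : pvGoA dp i (j+1+1) (cnt : Int) result
        = pvGoA dp i (j+1) ((cnt : Int) + 1)
            (result + (PySem.List.pyGet? pvCheck (PySem.Int.mod (cnt : Int) 3)).getD 0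
              * dp.getD (j+1) 0) := by
      rw [pvGoA]
      rw [if_neg (by omega), if_neg (by omega), if_neg (by omega), if_neg (by omega)]
    rw [h1, show ((cnt : Int) + 1) = ((cnt + 1 : Nat) : Int) from by push_cast; ring,
      ih (cnt+1) _ (by omega), pvCheck_get, hdp (j+1) (by omega)]
    rw [show pvMS (j+1) cnt = pvCC cnt * pvF (j+1) + pvMS j (cnt+1) from by rw [pvMS]]
    ring

-- the whole inner while loop at row i = m + 7
theorem pvGoA_top (dp : Array Int) (m : Nat)
    (hdp : ∀ t, t < m + 7 → dp.getD t 0 = pvF t) :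
    pvGoA dp (m+7) (m+7) 0 0
      = pvF (m+6) + 2 * pvF (m+5) + 5 * pvF (m+4) + pvMS (m+3) 0 := by
  have s1 : pvGoA dp (m+7) (m+7) 0 0 = pvGoA dp (m+7) (m+6) 0 (0 + dp.getD (m+6) 0) := by
    rw [show m+7 = (m+6)+1 from rfl, pvGoA, if_pos (by omega)]
  have s2 : pvGoA dp (m+7) (m+6) 0 (0 + dp.getD (m+6) 0)
      = pvGoA dp (m+7) (m+5) 0 (0 + dp.getD (m+6) 0 + 2 * dp.getD (m+5) 0) := by
    rw [show m+6 = (m+5)+1 from rfl, pvGoA, if_neg (by omega), if_pos (by omega)]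
  have s3 : pvGoA dp (m+7) (m+5) 0 (0 + dp.getD (m+6) 0 + 2 * dp.getD (m+5) 0)
      = pvGoA dp (m+7) ((m+3)+1) 0
          (0 + dp.getD (m+6) 0 + 2 * dp.getD (m+5) 0 + 5 * dp.getD (m+4) 0) := by
    rw [show m+5 = (m+4)+1 from rfl, pvGoA, if_neg (by omega), if_neg (by omega),
      if_pos (by omega)]
  have hmid := pvGoA_mid dp (m+7) hdp (m+3) 0
    (0 + dp.getD (m+6) 0 + 2 * dp.getD (m+5) 0 + 5 * dp.getD (m+4) 0) (by omega)
  push_cast at hmid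
  rw [s1, s2, s3, hmid, hdp (m+6) (by omega), hdp (m+5) (by omega), hdp (m+4) (by omega)]
  ring

-- recurrence equation of pvF at i = m + 7
theorem pvF_succ (m : Nat) :
    pvF (m+7) = PySem.Int.mod (pvF (m+6) + 2 * pvF (m+5) + 5 * pvF (m+4) + pvMS (m+3) 0)
      1000000007 := by
  rw [pvF]

-- A's outer loop keeps dp[t] = pvF t
theorem pvLoopA_inv : ∀ (fuel i : Nat) (dp : Array Int), 7 ≤ i → i + fuel ≤ dp.size →
    (∀ t, t < i → dp.getD t 0 = pvF t) →
    ∀ t, t < i + fuel → (pvLoopA dp i fuel).getD t 0 = pvF t := by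
  intro fuel
  induction fuel with
  | zero => intro i dp _ _ hdp t ht; rw [pvLoopA]; exact hdp t (by omega)
  | succ fuel ih =>
    intro i dp hi hsz hdp t ht
    obtain ⟨m, rfl⟩ : ∃ m, i = m + 7 := ⟨i - 7, by omega⟩
    rw [pvLoopA]
    have hval : PySem.Int.mod (pvGoA dp (m+7) (m+7) 0 0) 1000000007 = pvF (m+7) := by
      rw [pvGoA_top dp m hdp, pvF_succ]
    set dp' := dp.setIfInBounds (m+7) (PySem.Int.mod (pvGoA dp (m+7) (m+7) 0 0) 1000000007)
      with hdp'
    have hsz' : dp'.size = dp.size := by simp [hdp']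
    have hdpnew : ∀ t, t < m + 7 + 1 → dp'.getD t 0 = pvF t := by
      intro t ht'
      have hget : dp'[t]? = if m + 7 = t then some (PySem.Int.mod (pvGoA dp (m+7) (m+7) 0 0)
          1000000007) else dp[t]? := by
        rw [hdp', Array.getElem?_setIfInBounds]
        by_cases he : m + 7 = t
        · simp [he, show t < dp.size from by omega]
        · simp [he]
      by_cases he : m + 7 = t
      · rw [Array.getD_eq_getD_getElem?, hget, if_pos he, Option.getD_some, hval, he]
      · rw [Array.getD_eq_getD_getElem?, hget, if_neg he, ← Array.getD_eq_getD_getElem?]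
        exact hdp t (by omega)
    exact ih (m+7+1) dp' (by omega) (by omega) hdpnew t (by omega)

-- seed array facts (A's n > 6 branch)
theorem pvDp0_size (n : Int) : (pvDp0 n).size = 4 + (n - 3).toNat := by
  simp [pvDp0, Array.size_append, Array.size_replicate]

theorem pvInitA_size (n : Int) (h : 6 < n) : (pvInitA n).size = n.toNat + 1 := by
  rw [pvInitA, Array.size_setIfInBounds, pvDp2, Array.size_setIfInBounds, pvDp1,
    Array.size_setIfInBounds, pvDp0_size]
  omega

theorem pvDp0_getD (n : Int) (h : 6 < n) :
    ∀ u, u < 7 → (pvDp0 n).getD u 0 = ([0,1,3,10,0,0,0] : List Int).getD u 0 := by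
  intro u hu
  rw [pvDp0, Array.getD_eq_getD_getElem?]
  have h4 : (#[0,1,3,10] : Array Int).size = 4 := rfl
  by_cases hu4 : u < 4
  · rw [Array.getElem?_append_left (by rw [h4]; omega)]
    interval_cases u <;> rfl
  · rw [Array.getElem?_append_right (by rw [h4]; omega), Array.getElem?_replicate, h4,
      if_pos (by omega)]
    interval_cases u <;> rfl

theorem pvDp1_getD (n : Int) (h : 6 < n) :
    ∀ u, u < 7 → (pvDp1 n).getD u 0 = ([0,1,3,10,23,0,0] : List Int).getD u 0 := by
  intro u hu
  rw [pvDp1, Array.getD_eq_getD_getElem?, Array.getElem?_setIfInBounds]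
  by_cases h4 : 4 = u
  · rw [if_pos h4, if_pos (by rw [pvDp0_size]; omega), ← h4]
    rw [pvDp0_getD n h 3 (by omega), pvDp0_getD n h 2 (by omega), pvDp0_getD n h 1 (by omega)]
    rfl
  · rw [if_neg h4, ← Array.getD_eq_getD_getElem?, pvDp0_getD n h u hu]
    interval_cases u <;> simp_all

theorem pvDp2_getD (n : Int) (h : 6 < n) :
    ∀ u, u < 7 → (pvDp2 n).getD u 0 = ([0,1,3,10,23,62,0] : List Int).getD u 0 := by
  intro u hu
  rw [pvDp2, Array.getD_eq_getD_getElem?, Array.getElem?_setIfInBounds]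
  by_cases h5 : 5 = u
  · rw [if_pos h5, if_pos (by rw [pvDp1, Array.size_setIfInBounds, pvDp0_size]; omega), ← h5]
    rw [pvDp1_getD n h 4 (by omega), pvDp1_getD n h 3 (by omega), pvDp1_getD n h 2 (by omega),
      pvDp1_getD n h 1 (by omega)]
    rfl
  · rw [if_neg h5, ← Array.getD_eq_getD_getElem?, pvDp1_getD n h u hu]
    interval_cases u <;> simp_all

theorem pvInitA_getD (n : Int) (h : 6 < n) :
    ∀ u, u < 7 → (pvInitA n).getD u 0 = ([0,1,3,10,23,62,170] : List Int).getD u 0 := by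
  intro u hu
  rw [pvInitA, Array.getD_eq_getD_getElem?, Array.getElem?_setIfInBounds]
  by_cases h6 : 6 = u
  · rw [if_pos h6, if_pos (by rw [pvDp2, Array.size_setIfInBounds, pvDp1,
      Array.size_setIfInBounds, pvDp0_size]; omega), ← h6]
    rw [pvDp2_getD n h 5 (by omega), pvDp2_getD n h 4 (by omega), pvDp2_getD n h 3 (by omega),
      pvDp2_getD n h 2 (by omega), pvDp2_getD n h 1 (by omega)]
    rfl
  · rw [if_neg h6, ← Array.getD_eq_getD_getElem?, pvDp2_getD n h u hu]
    interval_cases u <;> simp_all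

theorem pvF_small :
    pvF 0 = 0 ∧ pvF 1 = 1 ∧ pvF 2 = 3 ∧ pvF 3 = 10 ∧ pvF 4 = 23 ∧ pvF 5 = 62 ∧ pvF 6 = 170 := by
  refine ⟨?_, ?_, ?_, ?_, ?_, ?_, ?_⟩ <;> rw [pvF]

theorem pvInitA_getD_F (n : Int) (h : 6 < n) :
    ∀ t, t < 7 → (pvInitA n).getD t 0 = pvF t := by
  intro t ht
  rw [pvInitA_getD n h t ht]
  interval_cases t <;> rw [pvF] <;> rfl

-- B's loop state at the start of iteration i = m + 7
def pvStB (m : Nat) : Int × Int × Int × Int × Int × Int :=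
  (pvF (m+6), pvF (m+5), pvF (m+4), pvCS 0 (m+3) % 1000000007,
   pvCS 1 (m+3) % 1000000007, pvCS 2 (m+3) % 1000000007)

theorem pvStB_zero : pvStB 0 = (170, 62, 23, 11, 1, 3) := by
  have h0 : pvCS 0 3 = 11 := by
    rw [pvCS, pvCS, pvCS, pvCS]; norm_num [pvF_small.2.2.2.1, pvF_small.2.2.1, pvF_small.2.1]
  have h1 : pvCS 1 3 = 1 := by
    rw [pvCS, pvCS, pvCS, pvCS]; norm_num [pvF_small.2.2.2.1, pvF_small.2.2.1, pvF_small.2.1]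
  have h2 : pvCS 2 3 = 3 := by
    rw [pvCS, pvCS, pvCS, pvCS]; norm_num [pvF_small.2.2.2.1, pvF_small.2.2.1, pvF_small.2.1]
  rw [pvStB]
  norm_num [h0, h1, h2, pvF_small.2.2.2.2.2.2, pvF_small.2.2.2.2.2.1, pvF_small.2.2.2.2.1]

theorem pvStepB_inv (m : Nat) : pvStepB (pvStB m) (m+7) = pvStB (m+1) := by
  have hP : (0 : Int) < 1000000007 := by norm_num
  have hmod : ∀ x : Int, PySem.Int.mod x 1000000007 = x % 1000000007 :=
    fun x => PySem.Int.mod_eq_emod_of_pos hP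
  have hsub4 : (m + 7 - 4) % 3 = (m + 3) % 3 := by omega
  have hsub3 : (m + 7 - 3) % 3 = (m + 4) % 3 := by omega
  have hcs : ∀ r, pvCS r (m+1+3) = pvCS r (m+3) + (if (m+4) % 3 = r then pvF (m+4) else 0) := by
    intro r
    rw [show m+1+3 = (m+3)+1 from by omega, pvCS, show m+3+1 = m+4 from by omega]
  have hcur :
      PySem.Int.mod (pvF (m+6) + 2 * pvF (m+5) + 5 * pvF (m+4)
        + pvCB ((m+3) % 3) * (pvCS 0 (m+3) % 1000000007)
        + pvCB (((m+3) % 3 + 2) % 3) * (pvCS 1 (m+3) % 1000000007)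
        + pvCB (((m+3) % 3 + 1) % 3) * (pvCS 2 (m+3) % 1000000007)) 1000000007
      = pvF (m+1+6) := by
    rw [show m+1+6 = m+7 from by omega, pvF_succ, pvMS_decomp (m+3) 0, hmod, hmod]
    have e0 : pvCB ((m+3) % 3) = pvCC (0+(m+3)) := by rw [pvCC]; congr 1; omega
    have e1 : pvCB (((m+3) % 3 + 2) % 3) = pvCC (0+(m+3)+2) := by rw [pvCC]; congr 1; omega
    have e2 : pvCB (((m+3) % 3 + 1) % 3) = pvCC (0+(m+3)+1) := by rw [pvCC]; congr 1; omega
    rw [e0, e1, e2]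
    conv_rhs => rw [← add_assoc, ← add_assoc]
    have key : ∀ a : Int, Int.ModEq 1000000007 (a % 1000000007) a :=
      fun a => Int.emod_emod_of_dvd a dvd_rfl
    exact ((((Int.ModEq.refl (pvF (m+6) + 2 * pvF (m+5) + 5 * pvF (m+4))).add
      ((key (pvCS 0 (m+3))).mul_left (pvCC (0+(m+3))))).add
      ((key (pvCS 1 (m+3))).mul_left (pvCC (0+(m+3)+2)))).add
      ((key (pvCS 2 (m+3))).mul_left (pvCC (0+(m+3)+1))))
  have hs : ∀ r, (if (m+4) % 3 = r then PySem.Int.mod (pvCS r (m+3) % 1000000007 + pvF (m+4))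
        1000000007 else pvCS r (m+3) % 1000000007) = pvCS r (m+1+3) % 1000000007 := by
    intro r
    rw [hcs r]
    by_cases hr : (m+4) % 3 = r
    · rw [if_pos hr, if_pos hr, hmod, Int.emod_add_emod]
    · rw [if_neg hr, if_neg hr, add_zero]
  rw [pvStepB, pvStB, pvStB]
  simp only [hsub4, hsub3]
  refine Prod.ext ?_ (Prod.ext rfl (Prod.ext rfl (Prod.ext ?_ (Prod.ext ?_ ?_))))
  · exact hcur
  · exact hs 0
  · exact hs 1
  · exact hs 2

theorem pvLoopB_inv : ∀ (fuel m : Nat), pvLoopB (pvStB m) (m+7) fuel = pvStB (m+fuel) := by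
  intro fuel
  induction fuel with
  | zero => intro m; rw [pvLoopB, Nat.add_zero]
  | succ fuel ih =>
    intro m
    rw [pvLoopB, pvStepB_inv m, show m+7+1 = (m+1)+7 from by omega, ih (m+1),
      show m+1+fuel = m+(fuel+1) from by omega]

-- ===== VERDICT (by name: the statement is the Claim_ definition above) =====
theorem solution_spec : Claim_equal_solution := by
  unfold Claim_equal_solution
  intro n hDom hPre
  unfold Spec_solution
  by_cases h7 : 6 < n
  · obtain ⟨N, rfl⟩ : ∃ N : Nat, n = (N : Int) := ⟨n.toNat, by omega⟩
    have hN7 : 7 ≤ N := by exact_mod_cast by omega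
    rw [solution, if_pos h7, solution_alt, if_neg (by omega)]
    have htn : ((N : Int) + 1 - 7).toNat = N - 6 := by omega
    have htn2 : ((N : Int)).toNat = N := by omega
    rw [htn, htn2]
    have hA : (pvLoopA (pvInitA (N : Int)) 7 (N - 6)).getD N 0 = pvF N :=
      pvLoopA_inv (N - 6) 7 (pvInitA (N : Int)) (by omega)
        (by rw [pvInitA_size _ h7]; omega) (pvInitA_getD_F _ h7) N (by omega)
    rw [hA, ← pvStB_zero]
    have hB := pvLoopB_inv (N - 6) 0
    norm_num at hB
    rw [hB, pvStB, show N - 6 + 6 = N from by omega]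
  · have hle : n ≤ 6 := by omega
    have hlo : -7 ≤ n := hPre
    interval_cases n <;> decide
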